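-- pv_equiv track=rewrite | github.com/andrewdef/advent_of_code_2020 | day_24/advent_of_code_day_24_2.py | follow_direction
-- ===== SOURCE A (Python) =====
-- def follow_direction(direction):
-- 	ns = 0
-- 	ew = 0
--
-- 	for way in direction:
-- 		if way == 'e':
-- 			ew += 1
-- 		elif way == 'w':
-- 			ew -= 1
-- 		elif way == 'se':
-- 			ew += 1
-- 			ns -= 1
-- 		elif way == 'sw':
-- 			ns -= 1
-- 		elif way == 'ne':
-- 			ns += 1
-- 		elif way == 'nw':
-- 			ew -= 1
-- 			ns += 1
--
-- 	return (ew, ns)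
-- ===== SOURCE B (Python) =====
-- DELTA = {'e': (1, 0), 'w': (-1, 0), 'se': (1, -1), 'sw': (0, -1),
--          'ne': (0, 1), 'nw': (-1, 1)}  # (ew, ns) step per direction
--
--
-- def _vec_sum(vecs, lo, hi):
--     """Sum vecs[lo:hi] by divide and conquer (vector addition is associative)."""
--     if hi - lo == 0:
--         return (0, 0)
--     if hi - lo == 1:
--         return vecs[lo]
--     mid = (lo + hi) // 2
--     le, ln = _vec_sum(vecs, lo, mid)
--     re, rn = _vec_sum(vecs, mid, hi)
--     return (le + re, ln + rn)
--
--
-- def follow_direction(direction):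
--     vecs = [DELTA.get(way, (0, 0)) for way in direction]
--     return _vec_sum(vecs, 0, len(vecs))
-- ===== Notes on version B (the rewrite author's own statement) =====
-- stated objective: alternative
-- what changed: B first maps every token to a delta vector through a lookup table, then sums the vectors by recursive divide-and-conquer on halves (sound since vector addition is associative and commutative), instead of A's single branch-per-token accumulator loop.
import Mathlib
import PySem

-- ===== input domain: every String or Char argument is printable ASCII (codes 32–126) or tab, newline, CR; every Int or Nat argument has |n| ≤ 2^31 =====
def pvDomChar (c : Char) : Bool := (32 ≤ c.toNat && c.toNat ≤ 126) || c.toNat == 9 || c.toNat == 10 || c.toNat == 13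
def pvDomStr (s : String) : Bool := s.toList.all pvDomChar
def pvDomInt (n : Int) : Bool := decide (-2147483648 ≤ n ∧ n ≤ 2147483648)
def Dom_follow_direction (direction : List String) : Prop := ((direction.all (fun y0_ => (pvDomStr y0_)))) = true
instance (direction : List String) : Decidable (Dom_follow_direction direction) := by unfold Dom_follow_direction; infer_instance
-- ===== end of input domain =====

-- B maps each token to a delta vector via a lookup table and sums the vectors by recursive
-- divide-and-conquer (sound since vector addition is associative); alternative decomposition, same cost.

-- ===== PORT A =====
-- A's per-token branch chain, state (ns, ew); returns (ew, ns)
def followStepA (acc : Int × Int) (way : String) : Int × Int :=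
  if way == "e" then (acc.1, acc.2 + 1)
  else if way == "w" then (acc.1, acc.2 - 1)
  else if way == "se" then (acc.1 - 1, acc.2 + 1)
  else if way == "sw" then (acc.1 - 1, acc.2)
  else if way == "ne" then (acc.1 + 1, acc.2)
  else if way == "nw" then (acc.1 + 1, acc.2 - 1)
  else acc

def follow_direction (direction : List String) : Int × Int :=
  let st := direction.foldl followStepA (0, 0)
  (st.2, st.1)

-- ===== PORT B =====
-- DELTA table of Source B: (ew, ns) step per direction token
def deltaTable : PySem.Dict String (Int × Int) :=
  PySem.Dict.ofList [("e", (1, 0)), ("w", (-1, 0)), ("se", (1, -1)), ("sw", (0, -1)),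
                     ("ne", (0, 1)), ("nw", (-1, 1))]

-- _vec_sum of Source B: the (lo, hi) index pair on vecs is ported as the sublist vecs[lo:hi]
-- (the recursive calls split at (lo+hi)//2, i.e. at relative position (hi-lo)//2 = length/2)
def vecSum (l : List (Int × Int)) : Int × Int :=
  match l with
  | [] => (0, 0)
  | [v] => v
  | a :: b :: rest =>
    let m := a :: b :: rest
    let k := m.length / 2
    let p := vecSum (m.take k)
    let q := vecSum (m.drop k)
    (p.1 + q.1, p.2 + q.2)
termination_by l.length
decreasing_by
  all_goals simp; omega

def follow_direction_alt (direction : List String) : Int × Int :=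
  let vecs := direction.map (fun way => deltaTable.getD way (0, 0))
  vecSum vecs

-- ===== PRECONDITION & SPEC =====
def Spec_follow_direction (direction : List String) (out : Int × Int) : Prop := out = follow_direction_alt direction
instance (direction : List String) (out : Int × Int) : Decidable (Spec_follow_direction direction out) := by unfold Spec_follow_direction; infer_instance

-- ===== CLAIM (what is proved, stated in full; the proofs are below) =====
def Claim_equal_follow_direction : Prop := ∀ (direction : List String), Dom_follow_direction direction → Spec_follow_direction direction (follow_direction direction)

-- ===== LEMMAS AND PROOFS =====

-- the divide-and-conquer sum is the componentwise sum
theorem vecSum_eq (l : List (Int × Int)) :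
    vecSum l = ((l.map Prod.fst).sum, (l.map Prod.snd).sum) := by
  fun_induction vecSum l with
  | case1 => rfl
  | case2 v => cases v; simp
  | case3 a b rest m k p q ih1 ih2 =>
    simp only [p, q, m, k] at ih1 ih2 ⊢
    rw [ih1, ih2, Prod.ext_iff]
    constructor <;>
      · dsimp only
        rw [← List.sum_append, ← List.map_append, List.take_append_drop]

-- evaluating the DELTA table lookup
theorem delta_getD (x : String) :
    deltaTable.getD x (0, 0)
    = if x = "e" then ((1 : Int), (0 : Int)) else if x = "w" then (-1, 0)
      else if x = "se" then (1, -1) else if x = "sw" then (0, -1)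
      else if x = "ne" then (0, 1) else if x = "nw" then (-1, 1) else (0, 0) := by
  have h : deltaTable = PySem.Dict.mk [("e", (1, 0)), ("w", (-1, 0)), ("se", (1, -1)),
      ("sw", (0, -1)), ("ne", (0, 1)), ("nw", (-1, 1))] := by rfl
  rw [h, PySem.Dict.getD_eq_get?_getD]
  by_cases h1 : x = "e" <;> by_cases h2 : x = "w" <;> by_cases h3 : x = "se" <;>
    by_cases h4 : x = "sw" <;> by_cases h5 : x = "ne" <;> by_cases h6 : x = "nw" <;>
    first
      | (subst_vars; decide)
      | simp [beq_iff_eq, h1, h2, h3, h4, h5, h6, Ne.symm h1, Ne.symm h2, Ne.symm h3,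
              Ne.symm h4, Ne.symm h5, Ne.symm h6, PySem.Dict.get?]

-- A's fold in terms of the componentwise sums of the mapped delta vectors
theorem foldA_eq (l : List String) (acc : Int × Int) :
    l.foldl followStepA acc
    = (acc.1 + ((l.map (fun w => deltaTable.getD w (0, 0))).map Prod.snd).sum,
       acc.2 + ((l.map (fun w => deltaTable.getD w (0, 0))).map Prod.fst).sum) := by
  induction l generalizing acc with
  | nil => simp
  | cons x xs ih =>
    rw [List.foldl_cons, ih]
    by_cases h1 : x = "e" <;> by_cases h2 : x = "w" <;> by_cases h3 : x = "se" <;>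
      by_cases h4 : x = "sw" <;> by_cases h5 : x = "ne" <;> by_cases h6 : x = "nw" <;>
      simp [followStepA, delta_getD, h1, h2, h3, h4, h5, h6, Prod.ext_iff, beq_iff_eq] <;> omega

-- ===== VERDICT (by name: the statement is the Claim_ definition above) =====
theorem follow_direction_spec : Claim_equal_follow_direction := by
  intro direction _
  unfold Spec_follow_direction follow_direction follow_direction_alt
  simp only [foldA_eq, vecSum_eq]
  simp
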